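-- pv_equiv track=rewrite | github.com/cho-to/algo | 프로그래머스/2/42586. 기능개발/기능개발.py | solution
-- ===== SOURCE A (Python) =====
-- def solution(progresses, speeds):
--     total = []
--     answer = []
--     count = 0
--
--     length = len(progresses)
--
--     for i in range(0, length):
--         if (100 - progresses[i]) % speeds[i] == 0:
--             total.append((100 - progresses[i]) // speeds[i])
--         else:
--             total.append((100 - progresses[i]) // speeds[i] + 1)
--
--     prev = total[0]
--
--     for n in total:
--         if prev >= n:
--             count += 1
--         else:
--             answer.append(count)
--             count = 1
--             prev = n
--     answer.append(count)
--
--     return answer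
-- ===== SOURCE B (Python) =====
-- def solution(progresses, speeds):
--     days = [-((p - 100) // s) for p, s in zip(progresses, speeds)]
--     answer = []
--     while days:
--         cut = next((j for j in range(1, len(days)) if days[j] > days[0]), len(days))
--         answer.append(cut)
--         days = days[cut:]
--     return answer
-- ===== Notes on version B (the rewrite author's own statement) =====
-- stated objective: alternative
-- what changed: Instead of A's streaming fold that maintains a prev/count accumulator over a precomputed finish-day list, B repeatedly finds the cut point of the remaining suffix (the first day exceeding the suffix's first day), emits that cut as the group size and slices the suffix away, so each group size is computed directly from a split with no running count or leader state.
import Mathlib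
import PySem

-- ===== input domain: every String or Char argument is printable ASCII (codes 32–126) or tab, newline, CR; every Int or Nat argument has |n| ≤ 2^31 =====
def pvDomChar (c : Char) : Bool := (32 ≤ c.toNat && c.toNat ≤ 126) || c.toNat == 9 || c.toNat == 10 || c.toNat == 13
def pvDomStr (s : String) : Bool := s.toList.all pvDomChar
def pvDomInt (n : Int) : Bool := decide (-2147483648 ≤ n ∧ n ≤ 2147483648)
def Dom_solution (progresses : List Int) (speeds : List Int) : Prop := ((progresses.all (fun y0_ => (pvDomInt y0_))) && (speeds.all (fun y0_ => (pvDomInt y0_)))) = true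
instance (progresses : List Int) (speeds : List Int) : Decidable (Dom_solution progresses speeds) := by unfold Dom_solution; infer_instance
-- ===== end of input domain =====

-- B replaces A's streaming prev/count fold over the finish-day list by repeated
-- split-at-first-exceeding-leader on the remaining suffix; same return value on Pre_.

-- ===== PORT A =====
-- state of A's second loop: (answer, count, prev)
def solStepA (st : List Int × Int × Int) (n : Int) : List Int × Int × Int :=
  if st.2.2 ≥ n then (st.1, st.2.1 + 1, st.2.2) else (st.1 ++ [st.2.1], 1, n)

def solution (progresses : List Int) (speeds : List Int) : List Int :=
  let length : Int := progresses.length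
  let total : List Int :=
    (PySem.List.pyRange 0 length 1).foldl (fun total i =>
      if PySem.Int.mod (100 - PySem.List.pyGetD progresses i 0) (PySem.List.pyGetD speeds i 0) = 0 then
        total ++ [PySem.Int.floordiv (100 - PySem.List.pyGetD progresses i 0) (PySem.List.pyGetD speeds i 0)]
      else
        total ++ [PySem.Int.floordiv (100 - PySem.List.pyGetD progresses i 0) (PySem.List.pyGetD speeds i 0) + 1]) []
  let prev : Int := PySem.List.pyGetD total 0 0
  let res := total.foldl solStepA ([], 0, prev)
  res.1 ++ [res.2.1]

-- ===== PORT B =====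
-- the `next((j for j in range(1, len(days)) if days[j] > days[0]), len(days))` scan on the
-- tail: number of leading tail elements ≤ d0 (the cut is 1 + this)
def prefLe (d0 : Int) : List Int → Nat
  | [] => 0
  | x :: t => if x > d0 then 0 else 1 + prefLe d0 t

-- B's while loop: split off one group per iteration, slicing the suffix away
def solGroups : List Int → List Int → List Int
  | [], answer => answer
  | d0 :: t, answer =>
    let cut := 1 + prefLe d0 t
    solGroups ((d0 :: t).drop cut) (answer ++ [(cut : Int)])
termination_by days _ => days.length
decreasing_by
  simp only [List.length_drop, List.length_cons]; omega

def solution_alt (progresses : List Int) (speeds : List Int) : List Int :=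
  let days : List Int :=
    (progresses.zip speeds).map (fun ps => -(PySem.Int.floordiv (ps.1 - 100) ps.2))
  solGroups days []

-- ===== PRECONDITION & SPEC =====
-- Pre_ excludes exactly the inputs on which A raises: empty progresses (IndexError at total[0]),
-- speeds shorter than progresses (IndexError), and a zero among the used speeds (ZeroDivisionError).
def Pre_solution (progresses : List Int) (speeds : List Int) : Prop :=
  progresses ≠ [] ∧ progresses.length ≤ speeds.length ∧
    ∀ x ∈ speeds.take progresses.length, x ≠ 0
instance (progresses : List Int) (speeds : List Int) : Decidable (Pre_solution progresses speeds) := by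
  unfold Pre_solution; infer_instance

def pvWitness_solution : List Int × List Int := ([93, 30, 55], [1, 30, 5])

def Spec_solution (progresses : List Int) (speeds : List Int) (out : List Int) : Prop := out = solution_alt progresses speeds
instance (progresses : List Int) (speeds : List Int) (out : List Int) : Decidable (Spec_solution progresses speeds out) := by unfold Spec_solution; infer_instance

-- ===== CLAIM (what is proved, stated in full; the proofs are below) =====
def Claim_equal_solution : Prop := ∀ (progresses : List Int) (speeds : List Int), Dom_solution progresses speeds → Pre_solution progresses speeds → Spec_solution progresses speeds (solution progresses speeds)

-- ===== LEMMAS AND PROOFS =====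

-- ceiling division -((-a) // s) equals A's mod-tested branch, for every nonzero s
lemma ceil_eq_pos (a b : Int) (hb : 0 < b) :
    -(PySem.Int.floordiv (-a) b)
      = if PySem.Int.mod a b = 0 then PySem.Int.floordiv a b else PySem.Int.floordiv a b + 1 := by
  have hm := PySem.Int.floordiv_mul_add_mod a b
  have h0 := PySem.Int.mod_nonneg a hb
  have h1 := PySem.Int.mod_lt a hb
  by_cases h : PySem.Int.mod a b = 0
  · rw [if_pos h]
    exact (PySem.Int.neg_floordiv_neg_eq_iff_of_pos hb).2 ⟨by nlinarith, by nlinarith⟩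
  · rw [if_neg h]
    have h2 : 0 < PySem.Int.mod a b := lt_of_le_of_ne h0 (Ne.symm h)
    exact (PySem.Int.neg_floordiv_neg_eq_iff_of_pos hb).2 ⟨by nlinarith, by nlinarith⟩

lemma ceil_eq (a s : Int) (hs : s ≠ 0) :
    -(PySem.Int.floordiv (-a) s)
      = if PySem.Int.mod a s = 0 then PySem.Int.floordiv a s else PySem.Int.floordiv a s + 1 := by
  rcases lt_or_gt_of_ne hs with hneg | hpos
  · have hb : 0 < -s := by omega
    have key := ceil_eq_pos (-a) (-s) hb
    rw [neg_neg] at key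
    have eL : PySem.Int.floordiv (-a) s = PySem.Int.floordiv a (-s) := by
      conv_lhs => rw [show s = -(-s) from (neg_neg s).symm]
      exact PySem.Int.floordiv_neg_neg a (-s)
    have eM : PySem.Int.mod a s = -PySem.Int.mod (-a) (-s) := by
      conv_lhs => rw [show a = -(-a) from (neg_neg a).symm, show s = -(-s) from (neg_neg s).symm]
      exact PySem.Int.mod_neg_neg (-a) (-s)
    have eD : PySem.Int.floordiv a s = PySem.Int.floordiv (-a) (-s) := by
      conv_lhs => rw [show a = -(-a) from (neg_neg a).symm, show s = -(-s) from (neg_neg s).symm]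
      exact PySem.Int.floordiv_neg_neg (-a) (-s)
    simp only [eL, eM, eD, neg_eq_zero]
    exact key
  · exact ceil_eq_pos a s hpos

-- drop (1 + n) through a cons (the cut is written 1 + prefLe)
lemma drop_one_add_cons (n : Nat) (x : Int) (l : List Int) :
    List.drop (1 + n) (x :: l) = List.drop n l := by
  rw [Nat.add_comm, List.drop_succ_cons]

-- solGroups only appends to its accumulator
lemma solGroups_acc_aux (n : Nat) : ∀ (l : List Int), l.length ≤ n → ∀ (ans : List Int),
    solGroups l ans = ans ++ solGroups l [] := by
  induction n with
  | zero =>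
    intro l hl ans
    have : l = [] := List.eq_nil_of_length_eq_zero (Nat.le_zero.mp hl)
    subst this; simp [solGroups]
  | succ n ih =>
    intro l hl ans
    cases l with
    | nil => simp [solGroups]
    | cons d0 t =>
      rw [solGroups, solGroups]
      simp only [drop_one_add_cons]
      have hlen : (t.drop (prefLe d0 t)).length ≤ n := by
        simp only [List.length_drop]
        simp only [List.length_cons] at hl
        omega
      rw [ih _ hlen, ih _ hlen ([] ++ [((1 + prefLe d0 t : Nat) : Int)])]
      simp

lemma solGroups_acc (l : List Int) (ans : List Int) :
    solGroups l ans = ans ++ solGroups l [] :=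
  solGroups_acc_aux l.length l le_rfl ans

-- A's grouping fold, started mid-group with k already counted and leader pv,
-- produces the accumulated answer followed by B's suffix-splitting groups
lemma foldA_eq (l : List Int) : ∀ (ans : List Int) (k : Nat) (pv : Int),
    (l.foldl solStepA (ans, (k : Int), pv)).1 ++ [(l.foldl solStepA (ans, (k : Int), pv)).2.1]
      = ans ++ [((k + prefLe pv l : Nat) : Int)] ++ solGroups (l.drop (prefLe pv l)) [] := by
  induction l with
  | nil => intro ans k pv; simp [prefLe, solGroups]
  | cons x t ih =>
    intro ans k pv
    simp only [List.foldl_cons, solStepA]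
    by_cases h : pv ≥ x
    · rw [if_pos h]
      have hx : ¬ x > pv := by omega
      have : ((k : Int) + 1) = ((k + 1 : Nat) : Int) := by push_cast; ring
      rw [this, ih ans (k + 1) pv]
      simp only [prefLe, hx, if_false]
      rw [drop_one_add_cons,
        show k + (1 + prefLe pv t) = k + 1 + prefLe pv t from by omega]
    · rw [if_neg h]
      have hx : x > pv := by omega
      have h1 : (1 : Int) = ((1 : Nat) : Int) := by norm_num
      rw [h1, ih (ans ++ [(k : Int)]) 1 x]
      have hrhs : solGroups (x :: t) [] =
          [((1 + prefLe x t : Nat) : Int)] ++ solGroups (t.drop (prefLe x t)) [] := by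
        rw [solGroups]
        simp only [drop_one_add_cons]
        rw [solGroups_acc]
        simp
      simp [prefLe, hx, hrhs]

theorem solution_spec_aux (progresses speeds : List Int)
    (hp : Pre_solution progresses speeds) :
    solution progresses speeds = solution_alt progresses speeds := by
  obtain ⟨hne, hlen, hnz⟩ := hp
  -- A's first loop builds exactly B's day list
  have htotal :
      (PySem.List.pyRange 0 (progresses.length : Int) 1).foldl (fun total i =>
        if PySem.Int.mod (100 - PySem.List.pyGetD progresses i 0) (PySem.List.pyGetD speeds i 0) = 0 then
          total ++ [PySem.Int.floordiv (100 - PySem.List.pyGetD progresses i 0) (PySem.List.pyGetD speeds i 0)]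
        else
          total ++ [PySem.Int.floordiv (100 - PySem.List.pyGetD progresses i 0) (PySem.List.pyGetD speeds i 0) + 1]) []
      = (progresses.zip speeds).map (fun ps => -(PySem.Int.floordiv (ps.1 - 100) ps.2)) := by
    have hstep :
        (fun (total : List Int) (i : Int) =>
          if PySem.Int.mod (100 - PySem.List.pyGetD progresses i 0) (PySem.List.pyGetD speeds i 0) = 0 then
            total ++ [PySem.Int.floordiv (100 - PySem.List.pyGetD progresses i 0) (PySem.List.pyGetD speeds i 0)]
          else
            total ++ [PySem.Int.floordiv (100 - PySem.List.pyGetD progresses i 0) (PySem.List.pyGetD speeds i 0) + 1])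
        = fun total i => total ++
            [if PySem.Int.mod (100 - PySem.List.pyGetD progresses i 0) (PySem.List.pyGetD speeds i 0) = 0 then
               PySem.Int.floordiv (100 - PySem.List.pyGetD progresses i 0) (PySem.List.pyGetD speeds i 0)
             else
               PySem.Int.floordiv (100 - PySem.List.pyGetD progresses i 0) (PySem.List.pyGetD speeds i 0) + 1] := by
      funext total i; split <;> rfl
    rw [hstep, PySem.List.foldl_append_singleton_eq_map, List.nil_append,
        PySem.List.pyRange_zero_nat, List.map_map]
    apply List.ext_getElem
    · simp [List.length_zip]; omega
    · intro i hi1 hi2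
      have hip : i < progresses.length := by simpa using hi1
      have his : i < speeds.length := by omega
      simp only [List.getElem_map, Function.comp, List.getElem_range, List.getElem_zip,
        PySem.List.pyGetD_natCast, List.getD_eq_getElem?_getD,
        List.getElem?_eq_getElem hip, List.getElem?_eq_getElem his, Option.getD_some]
      have hs0 : speeds[i] ≠ 0 := by
        have h' : i < (speeds.take progresses.length).length := by
          simp [List.length_take]; omega
        have hmem := List.getElem_mem h'
        rw [List.getElem_take] at hmem
        exact hnz _ hmem
      rw [show progresses[i] - 100 = -(100 - progresses[i]) by ring, ceil_eq _ _ hs0]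
  unfold solution solution_alt
  simp only []
  rw [htotal]
  cases hdl : (progresses.zip speeds).map (fun ps => -(PySem.Int.floordiv (ps.1 - 100) ps.2)) with
  | nil =>
    exfalso
    have hpl : 0 < progresses.length := List.length_pos_iff.mpr hne
    have hz : (progresses.zip speeds).length = 0 := by
      have := congrArg List.length hdl
      simpa using this
    rw [List.length_zip] at hz
    omega
  | cons d0 rest =>
    simp only [PySem.List.pyGetD_zero_cons, List.foldl_cons]
    have hfirst : solStepA (([] : List Int), (0 : Int), d0) d0 = (([] : List Int), (1 : Int), d0) := by
      simp [solStepA]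
    rw [hfirst, show (1 : Int) = ((1 : Nat) : Int) by norm_num, foldA_eq rest [] 1 d0]
    rw [solGroups]
    simp only [drop_one_add_cons]
    rw [solGroups_acc (rest.drop (prefLe d0 rest)) ([] ++ [((1 + prefLe d0 rest : Nat) : Int)])]

-- ===== VERDICT (by name: the statement is the Claim_ definition above) =====
theorem solution_spec : Claim_equal_solution := by
  intro progresses speeds _ hpre
  unfold Spec_solution
  exact solution_spec_aux progresses speeds hpre
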